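-- pv_equiv track=rewrite | github.com/hskang2365/Code | py/Functions/CodingTest_AutoMatch.py | solution
-- ===== SOURCE A (Python) =====
-- def solution(words):
--     Trie = {}
--     for word in words:
--         cur_Trie = Trie
--         for w in word:
--             cur_Trie.setdefault(w,[0,{}])
--             cur_Trie[w][0] +=1
--             cur_Trie = cur_Trie[w][1]
--
--     result = 0
--     for word in words:
--         cur_Trie = Trie
--         for i in range(len(word)):
--             if cur_Trie[word[i]][0] == 1 :
--                 break
--             cur_Trie = cur_Trie[word[i]][1]
--         result += i+1
--     return result
--
-- words = ["word","war"]
-- ===== SOURCE B (Python) =====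
-- def solution(words):
--     # For each word, the answer is min(len(word), 1 + max LCP with any other word):
--     # position 1 + L is the first index where the prefix is typed by no other word.
--     def lcp(a, b):
--         k = 0
--         while k < len(a) and k < len(b) and a[k] == b[k]:
--             k += 1
--         return k
--
--     result = 0
--     for i in range(len(words)):
--         w = words[i]
--         best = 0
--         for v in words[:i] + words[i + 1:]:
--             best = max(best, lcp(w, v))
--         result += min(len(w), best + 1)
--     return result
-- ===== Notes on version B (the rewrite author's own statement) =====
-- stated objective: alternative
-- what changed: Replaces the frequency trie (build nested count nodes, then re-walk each word until a count-1 node) by a direct per-word scan that takes the maximum longest-common-prefix with every other word and adds min(len(word), maxLCP+1); no trie is built and the stale-loop-variable quirk on empty words disappears.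
-- intended difference: On lists that contain an empty word after a nonempty first word, A adds the stale inner-loop index i+1 left over from the previous word for each empty word, while B adds 0 (an empty word has no prefix to type), which is the intended contribution. — e.g. on solution(["a", ""]): A returns 2, B returns 1
import Mathlib
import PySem

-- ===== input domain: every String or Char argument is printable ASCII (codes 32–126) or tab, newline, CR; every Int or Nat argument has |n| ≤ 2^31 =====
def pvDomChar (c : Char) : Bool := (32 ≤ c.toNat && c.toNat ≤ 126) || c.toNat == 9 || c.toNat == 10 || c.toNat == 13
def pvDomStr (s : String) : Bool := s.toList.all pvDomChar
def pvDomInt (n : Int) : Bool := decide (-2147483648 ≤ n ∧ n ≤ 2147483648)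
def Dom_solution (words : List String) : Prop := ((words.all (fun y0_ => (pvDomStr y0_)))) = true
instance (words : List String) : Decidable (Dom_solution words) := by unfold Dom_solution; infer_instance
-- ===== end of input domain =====

-- B replaces A's frequency trie by a direct max-LCP-with-the-other-words scan per word
-- (alternative algorithm; A's stale inner loop index on later empty words is stated as D_ below).

-- ===== PORT A =====
-- the nested dict trie {char: [count, subtrie]}: children as an explicit sibling chain
inductive PTrie where
  | nil : PTrie
  | cons : Char → Int → PTrie → PTrie → PTrie

-- cur_Trie.setdefault(w,[0,{}]); cur_Trie[w][0] += 1; descend — for the whole word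
def insT : PTrie → List Char → PTrie
  | t, [] => t
  | .nil, c :: cs => .cons c 1 (insT .nil cs) .nil
  | .cons c' n sub sib, c :: cs =>
      if c' = c then .cons c' (n + 1) (insT sub cs) sib
      else .cons c' n sub (insT sib (c :: cs))
termination_by t cs => (cs.length, sizeOf t)

-- cur_Trie[word[i]]; the key is always present for an inserted word, so the .nil default is never hit
def findT : PTrie → Char → Int × PTrie
  | .nil, _ => (0, .nil)
  | .cons c' n sub sib, c => if c' = c then (n, sub) else findT sib c

-- the inner 'for i in range(len(word))' loop of the second pass; returns the final value of i
def walkA : PTrie → List Char → Int → Int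
  | _, [], i => i
  | _, [_], i => i
  | t, c :: cs, i =>
      let p := findT t c
      if p.1 = 1 then i else walkA p.2 cs (i + 1)

def solution (words : List String) : Int :=
  let trie := words.foldl (fun t w => insT t w.toList) PTrie.nil
  -- second pass threads the loop variable i across words (Python reuses the stale i on an empty word)
  (words.foldl (fun acc w =>
      match w.toList with
      | [] => (acc.1 + acc.2 + 1, acc.2)
      | l => let i := walkA trie l 0
             (acc.1 + i + 1, i)) ((0 : Int), (0 : Int))).1

-- ===== PORT B =====
def lcpB : List Char → List Char → Int
  | a :: as, b :: bs => if a = b then 1 + lcpB as bs else 0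
  | _, _ => 0

def solution_alt (words : List String) : Int :=
  (PySem.List.pyRange 0 (PySem.List.len words) 1).foldl (fun result i =>
    let w := PySem.List.pyGetD words i ""
    let others := PySem.List.slice words none (some i) ++ PySem.List.slice words (some (i + 1)) none
    let best := others.foldl (fun best v => max best (lcpB w.toList v.toList)) 0
    result + min (PySem.Str.len w) (best + 1)) 0

-- ===== PRECONDITION & SPEC =====
-- Pre_ excludes exactly the inputs whose FIRST word is empty: there A's inner loop variable i is
-- still undefined when 'result += i+1' runs and Python raises NameError.
def Pre_solution (words : List String) : Prop := words.head? ≠ some ""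
instance (words : List String) : Decidable (Pre_solution words) := by unfold Pre_solution; infer_instance
def pvWitness_solution : List String := ["word", "war"]

-- On lists that contain an empty word after a nonempty first word, A reuses the stale inner-loop
-- index i and adds i+1 for the empty word, while B adds the intended contribution 0 (an empty word
-- has no typed prefix), so B's value is the intended one.
def D_solution (words : List String) : Prop := "" ∈ words
instance (words : List String) : Decidable (D_solution words) := by unfold D_solution; infer_instance

def Spec_solution (words : List String) (out : Int) : Prop := ¬ D_solution words → out = solution_alt words
instance (words : List String) (out : Int) : Decidable (Spec_solution words out) := by unfold Spec_solution; infer_instance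

def pvDiffWitness_solution : List String := ["a", ""]
def pvDiffWitnessOut_solution : Int × Int := (2, 1)

-- ===== CLAIM (what is proved, stated in full; the proofs are below) =====
def Claim_unchanged_solution : Prop := ∀ (words : List String), Dom_solution words → Pre_solution words → Spec_solution words (solution words)
def Claim_changed_solution : Prop := Dom_solution (pvDiffWitness_solution) ∧ Pre_solution (pvDiffWitness_solution) ∧ D_solution (pvDiffWitness_solution) ∧ solution (pvDiffWitness_solution) = pvDiffWitnessOut_solution.1 ∧ solution_alt (pvDiffWitness_solution) = pvDiffWitnessOut_solution.2 ∧ pvDiffWitnessOut_solution.1 ≠ pvDiffWitnessOut_solution.2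

-- ===== LEMMAS AND PROOFS =====

-- count stored in the trie at a nonempty path
def lookC : PTrie → List Char → Int
  | .nil, _ => 0
  | .cons _ _ _ _, [] => 0
  | .cons c' n sub sib, c :: cs =>
      if c' = c then (if cs = [] then n else lookC sub cs) else lookC sib (c :: cs)

def cntP (p : List Char) (ws : List String) : Nat := ws.countP (fun w => p.isPrefixOf w.toList)

theorem ins_look (t : PTrie) (w : List Char) :
    ∀ p, lookC (insT t w) p = lookC t p + (if p ≠ [] ∧ p.isPrefixOf w then 1 else 0) := by
  induction t, w using insT.induct with
  | case1 t => intro p; simp [insT]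
  | case2 c cs ih =>
    intro p
    rw [show insT PTrie.nil (c :: cs) = PTrie.cons c 1 (insT PTrie.nil cs) PTrie.nil from by simp [insT]]
    match p with
    | [] => simp [lookC]
    | d :: ds =>
      by_cases hdc : c = d
      · subst hdc
        by_cases hds : ds = []
        · subst hds; simp [lookC, List.isPrefixOf]
        · simp [lookC, hds, ih ds, List.isPrefixOf]
      · simp [lookC, hdc, Ne.symm hdc, List.isPrefixOf]
  | case3 n sub sib c cs ih =>
    intro p
    rw [show insT (PTrie.cons c n sub sib) (c :: cs) = PTrie.cons c (n+1) (insT sub cs) sib from by simp [insT]]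
    match p with
    | [] => simp [lookC]
    | d :: ds =>
      by_cases hdc : c = d
      · subst hdc
        by_cases hds : ds = []
        · subst hds; simp [lookC, List.isPrefixOf]
        · simp [lookC, hds, ih ds, List.isPrefixOf]
      · simp [lookC, hdc, Ne.symm hdc, List.isPrefixOf]
  | case4 c' n sub sib c cs hc ih =>
    intro p
    rw [show insT (PTrie.cons c' n sub sib) (c :: cs) = PTrie.cons c' n sub (insT sib (c :: cs)) from by simp [insT, hc]]
    match p with
    | [] => simp [lookC]
    | d :: ds =>
      by_cases hdc : c' = d
      · subst hdc
        simp [lookC, List.isPrefixOf, Ne.symm hc]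
        exact fun h => absurd h hc
      · simp [lookC, hdc, ih (d :: ds)]

theorem foldl_ins_look (ws : List String) : ∀ (t : PTrie) (p : List Char), p ≠ [] →
    lookC (ws.foldl (fun t w => insT t w.toList) t) p = lookC t p + (cntP p ws : Int) := by
  induction ws with
  | nil => intro t p hp; simp [cntP]
  | cons w ws ih =>
    intro t p hp
    simp only [List.foldl_cons, ih _ p hp, ins_look, cntP, List.countP_cons]
    simp only [hp, ne_eq, not_false_iff, true_and]
    split <;> omega


theorem find_fst (t : PTrie) (c : Char) : (findT t c).1 = lookC t [c] := by
  induction t with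
  | nil => simp [findT, lookC]
  | cons c' n sub sib ihs ihsib =>
    simp only [findT, lookC]
    by_cases h : c' = c <;> simp [h, ihsib]


theorem find_snd (t : PTrie) (c : Char) : ∀ cs, cs ≠ [] → lookC (findT t c).2 cs = lookC t (c :: cs) := by
  induction t with
  | nil => intro cs h; simp [findT, lookC]
  | cons c' n sub sib ihs ihsib =>
    intro cs h
    simp only [findT, lookC]
    by_cases hc : c' = c <;> simp [hc, h, ihsib cs h]


theorem lcp_nonneg (a b : List Char) : 0 ≤ lcpB a b := by
  induction a generalizing b with
  | nil => simp [lcpB]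
  | cons x a' ih =>
    cases b with
    | nil => simp [lcpB]
    | cons y b' =>
      simp only [lcpB]
      split
      · have := ih b'; omega
      · omega

theorem take_prefix_iff (a : List Char) : ∀ (b : List Char) (k : Nat), k ≤ a.length →
    ((a.take k).isPrefixOf b ↔ (k : Int) ≤ lcpB a b) := by
  induction a with
  | nil =>
    intro b k hk
    have hk0 : k = 0 := by simpa using hk
    subst hk0
    simp [List.isPrefixOf, lcpB]
  | cons x a' ih =>
    intro b k hk
    match k with
    | 0 =>
      simp only [List.take_zero, List.isPrefixOf, Nat.cast_zero, true_iff]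
      exact lcp_nonneg _ _
    | (k' + 1) =>
      match b with
      | [] =>
        simp only [List.take_succ_cons, List.isPrefixOf, lcpB, Bool.false_eq_true, false_iff, not_le]
        push_cast; omega
      | y :: b' =>
        simp only [List.take_succ_cons]
        by_cases hxy : x = y
        · subst hxy
          simp only [lcpB, if_pos rfl, List.isPrefixOf, beq_self_eq_true, Bool.true_and]
          rw [ih b' k' (by simpa using hk)]
          constructor <;> intro h <;> push_cast at * <;> omega
        · have h1 : ¬ (x == y) = true := by simpa using hxy
          simp only [lcpB, hxy, if_false, List.isPrefixOf, h1, Bool.false_and, Bool.false_eq_true,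
            false_iff, not_le]
          push_cast; omega


theorem foldl_max_lt (g : String → Int) (k : Int) :
    ∀ (l : List String) (a : Int), (l.foldl (fun b v => max b (g v)) a < k ↔ a < k ∧ ∀ v ∈ l, g v < k) := by
  intro l
  induction l with
  | nil => simp
  | cons v l ih =>
    intro a
    simp only [List.foldl_cons, ih, List.mem_cons]
    constructor
    · rintro ⟨h1, h2⟩
      exact ⟨by omega, fun u hu => hu.elim (fun he => he ▸ (by omega)) (h2 u)⟩
    · rintro ⟨h1, h2⟩
      exact ⟨by have := h2 v (Or.inl rfl); omega, fun u hu => h2 u (Or.inr hu)⟩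


theorem foldl_max_init_le (g : String → Int) :
    ∀ (l : List String) (a : Int), a ≤ l.foldl (fun b v => max b (g v)) a := by
  intro l
  induction l with
  | nil => intro a; simp
  | cons v l ih =>
    intro a
    exact le_trans (le_max_left a (g v)) (ih _)

theorem walk_L : ∀ (cs : List Char) (t : PTrie) (i L : Int), cs ≠ [] → 0 ≤ L →
    (∀ k : Nat, 1 ≤ k → k ≤ cs.length → (lookC t (cs.take k) = 1 ↔ L < (k : Int))) →
    walkA t cs i = i - 1 + min (cs.length : Int) (L + 1) := by
  intro cs
  induction cs with
  | nil => intro t i L h _ _; exact absurd rfl h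
  | cons c cs' ih =>
    intro t i L _ hL hcnt
    cases cs' with
    | nil =>
      have h1 := hcnt 1 (by omega) (by simp)
      simp only [walkA, List.length_cons, List.length_nil]
      push_cast
      omega
    | cons c2 cs'' =>
      have h1 := hcnt 1 (by omega) (by simp)
      simp only [List.take_succ_cons, List.take_zero] at h1
      simp only [walkA, find_fst]
      by_cases hb : lookC t [c] = 1
      · have hlt : L < 1 := (h1.mp hb)
        simp only [hb, if_pos rfl, List.length_cons]
        push_cast
        omega
      · rw [if_neg hb]
        have hrec := ih (findT t c).2 (i + 1) (L - 1) (by simp) (by omega)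
          (by
            intro k hk1 hk2
            obtain ⟨k', rfl⟩ : ∃ k', k = k' + 1 := ⟨k - 1, by omega⟩
            rw [find_snd t c _ (by simp [List.take_succ_cons])]
            have h2 := hcnt (k' + 2) (by omega) (by simpa using hk2)
            simp only [List.take_succ_cons] at h2 ⊢
            rw [h2]
            push_cast
            omega)
        rw [hrec]
        have hL1 : 1 ≤ L := by
          by_contra hc
          exact hb (h1.mpr (by omega))
        simp only [List.length_cons]
        push_cast
        omega

def trieOf (ws : List String) : PTrie := ws.foldl (fun t w => insT t w.toList) PTrie.nil

def bestOf (w : String) (others : List String) : Int :=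
  others.foldl (fun b v => max b (lcpB w.toList v.toList)) 0

theorem solution_eq_sum (ws : List String) (h : ∀ w ∈ ws, w.toList ≠ []) :
    solution ws = (ws.map (fun w => walkA (trieOf ws) w.toList 0 + 1)).sum := by
  have H : ∀ (l : List String) (T : PTrie) (r i : Int), (∀ w ∈ l, w.toList ≠ []) →
      (l.foldl (fun acc w => match w.toList with
        | [] => (acc.1 + acc.2 + 1, acc.2)
        | l' => let i := walkA T l' 0; (acc.1 + i + 1, i)) (r, i)).1
      = r + (l.map (fun w => walkA T w.toList 0 + 1)).sum := by
    intro l T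
    induction l with
    | nil => intro r i _; simp
    | cons w l ih =>
      intro r i hl
      have hw := hl w (List.mem_cons_self)
      cases hwl : w.toList with
      | nil => exact absurd hwl hw
      | cons a as =>
        simp only [List.foldl_cons, hwl]
        rw [ih _ _ (fun v hv => hl v (List.mem_cons_of_mem w hv))]
        simp only [List.map_cons, List.sum_cons, hwl]
        ring
  have hH := H ws (trieOf ws) 0 0 h
  unfold trieOf at hH
  unfold solution
  simpa using hH

theorem countP_split (ws : List String) (k : Nat) (hk : k < ws.length) (P : String → Bool) :
    ws.countP P = (ws.take k ++ ws.drop (k + 1)).countP P + (if P ws[k] then 1 else 0) := by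
  conv_lhs => rw [← List.take_append_drop k ws, ← List.getElem_cons_drop hk]
  simp only [List.countP_append, List.countP_cons]
  split <;> omega

theorem per_index (ws : List String) (h : ∀ w ∈ ws, w.toList ≠ []) (k : Nat) (hk : k < ws.length) :
    walkA (trieOf ws) ws[k].toList 0 + 1
      = min (PySem.Str.len ws[k]) (bestOf ws[k] (ws.take k ++ ws.drop (k + 1)) + 1) := by
  have hw : ws[k].toList ≠ [] := h ws[k] (List.getElem_mem hk)
  have hL0 : 0 ≤ bestOf ws[k] (ws.take k ++ ws.drop (k + 1)) :=
    foldl_max_init_le _ _ 0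
  have hmain := walk_L ws[k].toList (trieOf ws) 0
      (bestOf ws[k] (ws.take k ++ ws.drop (k + 1))) hw hL0 ?_
  · rw [hmain, PySem.Str.len_eq]
    omega
  · intro k' h1 h2
    have htk : ws[k].toList.take k' ≠ [] := by
      intro hc
      rcases List.take_eq_nil_iff.mp hc with hc' | hc' <;>
        first | omega | exact hw hc'
    have hlook : lookC (trieOf ws) (ws[k].toList.take k')
        = (cntP (ws[k].toList.take k') ws : Int) := by
      unfold trieOf
      rw [foldl_ins_look ws PTrie.nil _ htk]
      simp [lookC]
    have hpref : (ws[k].toList.take k').isPrefixOf ws[k].toList = true :=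
      List.isPrefixOf_iff_prefix.mpr (List.take_prefix _ _)
    have hsplit : cntP (ws[k].toList.take k') ws
        = cntP (ws[k].toList.take k') (ws.take k ++ ws.drop (k + 1)) + 1 := by
      unfold cntP
      rw [countP_split ws k hk]
      simp [hpref]
    have hothers : (cntP (ws[k].toList.take k') (ws.take k ++ ws.drop (k + 1)) = 0)
        ↔ (∀ v ∈ ws.take k ++ ws.drop (k + 1), lcpB ws[k].toList v.toList < (k' : Int)) := by
      unfold cntP
      rw [List.countP_eq_zero]
      constructor
      · intro hz v hv
        have h3 := hz v hv
        have hiff := take_prefix_iff ws[k].toList v.toList k' h2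
        rw [hiff] at h3
        omega
      · intro hz v hv
        have hiff := take_prefix_iff ws[k].toList v.toList k' h2
        have h4 := hz v hv
        intro hc
        have := hiff.mp hc
        omega
    rw [hlook, hsplit]
    have hmax := foldl_max_lt (fun v => lcpB ws[k].toList v.toList) (k' : Int)
        (ws.take k ++ ws.drop (k + 1)) 0
    constructor
    · intro he
      have hz : cntP (ws[k].toList.take k') (ws.take k ++ ws.drop (k + 1)) = 0 := by omega
      exact hmax.mpr ⟨by exact_mod_cast (by omega : (0:Int) < (k':Int)), hothers.mp hz⟩
    · intro hlt
      have := (hmax.mp hlt).2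
      have hz := hothers.mpr this
      omega

theorem alt_eq_sum (ws : List String) :
    solution_alt ws = ((List.range ws.length).map (fun k =>
        min (PySem.Str.len (ws.getD k "")) (bestOf (ws.getD k "") (ws.take k ++ ws.drop (k + 1)) + 1))).sum := by
  unfold solution_alt
  show (PySem.List.pyRange 0 (PySem.List.len ws) 1).foldl (fun result i =>
      result + min (PySem.Str.len (PySem.List.pyGetD ws i ""))
        ((PySem.List.slice ws none (some i) ++ PySem.List.slice ws (some (i + 1)) none).foldl
          (fun best v => max best (lcpB (PySem.List.pyGetD ws i "").toList v.toList)) 0 + 1)) 0 = _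
  rw [PySem.List.foldl_add]
  rw [show PySem.List.len ws = ((ws.length : Nat) : Int) from by simp]
  rw [PySem.List.pyRange_zero_natCast, List.map_map]
  rw [zero_add]
  apply congrArg List.sum
  apply List.map_congr_left
  intro k hk
  have hk' : k < ws.length := List.mem_range.mp hk
  simp only [Function.comp_apply, PySem.List.pyGetD_natCast, PySem.List.slice_to_natCast, bestOf]
  rw [show ((k : Int) + 1) = (((k + 1 : Nat)) : Int) from by push_cast; ring,
    PySem.List.slice_from_natCast]

theorem sum_over (ws : List String) (f : String → Int) (g : Nat → Int)
    (h : ∀ (k : Nat) (hk : k < ws.length), f ws[k] = g k) :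
    (ws.map f).sum = ((List.range ws.length).map g).sum := by
  induction ws generalizing g with
  | nil => simp
  | cons w ws ih =>
    simp only [List.map_cons, List.sum_cons, List.length_cons, List.range_succ_eq_map,
      List.map_map]
    rw [ih (fun k => g (k + 1)) (fun k hk => by
      have := h (k + 1) (by simpa using hk)
      simpa using this)]
    have h0 := h 0 (by simp)
    simp only [List.getElem_cons_zero] at h0
    rw [h0]
    congr 1

-- ===== VERDICT (by name: the statement is the Claim_ definition above) =====
theorem solution_spec : Claim_unchanged_solution := by
  intro words _ _ hD
  have h : ∀ w ∈ words, w.toList ≠ [] := by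
    intro w hw hnil
    have hwe : w = "" := by simpa using hnil
    exact hD (by unfold D_solution; exact hwe ▸ hw)
  rw [solution_eq_sum words h, alt_eq_sum words]
  exact sum_over words _ _ (fun k hk => by
    rw [List.getD_eq_getElem words "" hk]
    exact per_index words h k hk)

theorem solution_changed : Claim_changed_solution := by
  unfold Claim_changed_solution; decide
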